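-- pv_equiv track=rewrite | github.com/YAxelY/dataAnalyst | project/tests/AnovaTwoWayR.py | compute_sum_of_tj
-- ===== SOURCE A (Python) =====
-- def compute_sum_of_tj(arrays):
--     if not arrays:
--         return []
--
--     max_length = max(len(array) for array in arrays)
--     sum_of_tj = [0] * max_length
--
--     for array in arrays:
--         for index, item in enumerate(array):
--             sum_of_tj[index] += sum(item)
--
--     return sum_of_tj
-- ===== SOURCE B (Python) =====
-- from itertools import zip_longest
--
--
-- def compute_sum_of_tj(arrays):
--     return [sum(sum(item) for item in column)
--             for column in zip_longest(*arrays, fillvalue=[])]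
-- ===== Notes on version B (the rewrite author's own statement) =====
-- stated objective: idiomatic
-- what changed: B transposes the ragged input with itertools.zip_longest using an empty-list fillvalue and computes each output cell independently as a column sum, instead of preallocating a result list and accumulating row-major with index updates.
import Mathlib
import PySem

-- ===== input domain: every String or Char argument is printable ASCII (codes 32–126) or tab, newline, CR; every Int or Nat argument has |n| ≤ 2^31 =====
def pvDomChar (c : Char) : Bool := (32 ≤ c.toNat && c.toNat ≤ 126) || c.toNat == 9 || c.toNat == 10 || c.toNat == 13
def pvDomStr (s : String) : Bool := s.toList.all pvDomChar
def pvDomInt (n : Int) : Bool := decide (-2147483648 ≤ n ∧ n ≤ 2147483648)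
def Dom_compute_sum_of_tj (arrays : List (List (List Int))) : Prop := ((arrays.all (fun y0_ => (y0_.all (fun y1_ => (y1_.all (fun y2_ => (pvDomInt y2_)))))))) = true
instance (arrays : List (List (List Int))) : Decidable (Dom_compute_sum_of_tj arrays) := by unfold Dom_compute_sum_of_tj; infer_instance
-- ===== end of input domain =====

-- B replaces A's preallocate-and-accumulate row-major loop by an idiomatic zip_longest
-- transpose with column-wise sums; same cost, different decomposition.

-- ===== PORT A =====
-- 'for index, item in enumerate(array): sum_of_tj[index] += sum(item)'
-- (index is always in range, since len(array) ≤ max_length = len(sum_of_tj))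
def pvInnerA (s : List Int) (idx : Nat) (arr : List (List Int)) : List Int :=
  match arr with
  | [] => s
  | item :: rest => pvInnerA (s.set idx (s.getD idx 0 + item.sum)) (idx + 1) rest

def compute_sum_of_tj (arrays : List (List (List Int))) : List Int :=
  if arrays = [] then []
  else
    -- max(len(array) for array in arrays); arrays ≠ [], so max? is some
    let max_length : Int :=
      (PySem.List.max? (arrays.map (fun a => (a.length : Int))) (fun x => x)).getD 0
    let sum_of_tj : List Int := List.replicate max_length.toNat 0
    arrays.foldl (fun s arr => pvInnerA s 0 arr) sum_of_tj

-- ===== PORT B =====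
-- termination helpers for the zip_longest transpose (cited by pvCols' decreasing_by)
theorem pvTailLensLe (arrays : List (List (List Int))) :
    ((arrays.map (fun a => a.tail)).map List.length).sum ≤ (arrays.map List.length).sum := by
  induction arrays with
  | nil => simp
  | cons a rest ih =>
      simp only [List.map_cons, List.sum_cons, List.length_tail]
      omega

theorem pvTailLensLt (arrays : List (List (List Int))) (h : ¬ arrays.all (fun a => a.isEmpty)) :
    ((arrays.map (fun a => a.tail)).map List.length).sum < (arrays.map List.length).sum := by
  induction arrays with
  | nil => simp at h
  | cons a rest ih =>
      simp only [List.map_cons, List.sum_cons, List.length_tail]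
      by_cases ha : a = []
      · subst ha
        simp only [List.all_cons, List.isEmpty_nil, Bool.true_and] at h
        have := ih h
        simpa using this
      · have h1 : 0 < a.length := List.length_pos_iff.mpr ha
        have := pvTailLensLe rest
        omega

-- itertools.zip_longest(*arrays, fillvalue=[]): yield one column (with [] for
-- exhausted rows) while some row still has elements
def pvCols (arrays : List (List (List Int))) : List (List (List Int)) :=
  if arrays.all (fun a => a.isEmpty) then []
  else (arrays.map (fun a => a.headD [])) :: pvCols (arrays.map (fun a => a.tail))
termination_by (arrays.map List.length).sum
decreasing_by simpa using pvTailLensLt arrays (by assumption)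

def compute_sum_of_tj_alt (arrays : List (List (List Int))) : List Int :=
  (pvCols arrays).map (fun column => (column.map (fun item => item.sum)).sum)

-- ===== PRECONDITION & SPEC =====
def Spec_compute_sum_of_tj (arrays : List (List (List Int))) (out : List Int) : Prop := out = compute_sum_of_tj_alt arrays
instance (arrays : List (List (List Int))) (out : List Int) : Decidable (Spec_compute_sum_of_tj arrays out) := by unfold Spec_compute_sum_of_tj; infer_instance

-- ===== CLAIM (what is proved, stated in full; the proofs are below) =====
def Claim_equal_compute_sum_of_tj : Prop := ∀ (arrays : List (List (List Int))), Dom_compute_sum_of_tj arrays → Spec_compute_sum_of_tj arrays (compute_sum_of_tj arrays)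

-- ===== LEMMAS AND PROOFS =====

-- the value both programs compute at column j
def pvColSum : List (List (List Int)) → Nat → Int
  | [], _ => 0
  | arr :: rest, j => ((arr[j]?).getD []).sum + pvColSum rest j

-- number of columns
def pvMaxLen (arrays : List (List (List Int))) : Nat := (arrays.map List.length).foldr max 0

theorem pvMaxLen_ge (arrays : List (List (List Int))) (arr : List (List Int)) (h : arr ∈ arrays) :
    arr.length ≤ pvMaxLen arrays := by
  induction arrays with
  | nil => simp at h
  | cons a rest ih =>
      rcases List.mem_cons.mp h with rfl | h'
      · simp [pvMaxLen]
      · have := ih h'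
        simp only [pvMaxLen, List.map_cons, List.foldr_cons]
        exact le_trans this (Nat.le_max_right _ _)

theorem pvMaxLen_mem (arrays : List (List (List Int))) (h : arrays ≠ []) :
    pvMaxLen arrays ∈ arrays.map List.length := by
  induction arrays with
  | nil => simp at h
  | cons a rest ih =>
      by_cases hr : rest = []
      · subst hr; simp [pvMaxLen]
      · have hm := ih hr
        simp only [pvMaxLen, List.map_cons, List.foldr_cons]
        rcases Nat.le_total a.length ((rest.map List.length).foldr max 0) with hle | hle
        · rw [Nat.max_eq_right hle]
          exact List.mem_cons_of_mem _ hm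
        · rw [Nat.max_eq_left hle]
          exact List.mem_cons_self
theorem pvMaxLen_zero_of_all_empty (arrays : List (List (List Int)))
    (h : arrays.all (fun a => a.isEmpty) = true) : pvMaxLen arrays = 0 := by
  induction arrays with
  | nil => simp [pvMaxLen]
  | cons a rest ih =>
      simp only [List.all_cons, Bool.and_eq_true, List.isEmpty_iff] at h
      obtain ⟨ha, hr⟩ := h
      subst ha
      have := ih (by simpa using hr)
      simp only [pvMaxLen, List.map_cons, List.foldr_cons, List.length_nil] at this ⊢
      omega

theorem pvMaxLen_tail (arrays : List (List (List Int))) :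
    pvMaxLen (arrays.map (fun a => a.tail)) = pvMaxLen arrays - 1 := by
  induction arrays with
  | nil => simp [pvMaxLen]
  | cons a rest ih =>
      simp only [pvMaxLen, List.map_cons, List.foldr_cons, List.length_tail] at *
      rw [ih]
      omega

theorem pvMaxLen_pos (arrays : List (List (List Int))) (h : ¬ arrays.all (fun a => a.isEmpty)) :
    1 ≤ pvMaxLen arrays := by
  induction arrays with
  | nil => simp at h
  | cons a rest ih =>
      simp only [pvMaxLen, List.map_cons, List.foldr_cons]
      by_cases ha : a = []
      · subst ha
        simp only [List.all_cons, List.isEmpty_nil, Bool.true_and] at h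
        have := ih h
        simp only [pvMaxLen] at this
        omega
      · have : 0 < a.length := List.length_pos_iff.mpr ha
        omega

theorem pvColSum_tail (arrays : List (List (List Int))) (j : Nat) :
    pvColSum (arrays.map (fun a => a.tail)) j = pvColSum arrays (j + 1) := by
  induction arrays with
  | nil => simp [pvColSum]
  | cons a rest ih =>
      simp only [List.map_cons, pvColSum, List.getElem?_tail, ih]

theorem pvColSum_zero (arrays : List (List (List Int))) :
    pvColSum arrays 0 = ((arrays.map (fun a => a.headD [])).map (fun item => item.sum)).sum := by
  induction arrays with
  | nil => simp [pvColSum]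
  | cons a rest ih =>
      simp only [List.map_cons, List.sum_cons, pvColSum, ih]
      congr 1
      cases a <;> simp

-- B computes [pvColSum arrays j | j < pvMaxLen arrays]
theorem pvAlt_length (arrays : List (List (List Int))) :
    (compute_sum_of_tj_alt arrays).length = pvMaxLen arrays := by
  unfold compute_sum_of_tj_alt
  induction arrays using pvCols.induct with
  | case1 arrays h =>
      rw [pvCols, if_pos h]
      simp [pvMaxLen_zero_of_all_empty arrays h]
  | case2 arrays h ih =>
      simp only [List.map_subtype, List.unattach_attach] at ih
      rw [pvCols, if_neg h]
      simp only [List.map_cons, List.length_cons]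
      rw [ih, pvMaxLen_tail]
      have := pvMaxLen_pos arrays h
      omega

theorem pvAlt_getD (arrays : List (List (List Int))) :
    ∀ j : Nat, j < pvMaxLen arrays →
      (compute_sum_of_tj_alt arrays).getD j 0 = pvColSum arrays j := by
  unfold compute_sum_of_tj_alt
  induction arrays using pvCols.induct with
  | case1 arrays h =>
      intro j hj
      rw [pvMaxLen_zero_of_all_empty arrays h] at hj
      omega
  | case2 arrays h ih =>
      simp only [List.map_subtype, List.unattach_attach] at ih
      intro j hj
      rw [pvCols, if_neg h]
      simp only [List.map_cons]
      cases j with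
      | zero =>
          simpa only [List.getD_cons_zero] using (pvColSum_zero arrays).symm
      | succ k =>
          rw [List.getD_cons_succ]
          rw [ih k (by rw [pvMaxLen_tail]; omega), pvColSum_tail]

-- A's inner loop, pointwise
theorem pvInnerA_length (arr : List (List Int)) (s : List Int) (idx : Nat) :
    (pvInnerA s idx arr).length = s.length := by
  induction arr generalizing s idx with
  | nil => rfl
  | cons item rest ih => simp [pvInnerA, ih]

theorem pvInnerA_getD (arr : List (List Int)) (s : List Int) (idx : Nat)
    (h : idx + arr.length ≤ s.length) (j : Nat) :
    (pvInnerA s idx arr).getD j 0 =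
      s.getD j 0 + (if idx ≤ j ∧ j < idx + arr.length then ((arr[j - idx]?).getD []).sum else 0) := by
  induction arr generalizing s idx with
  | nil =>
      simp only [pvInnerA, List.length_nil, Nat.add_zero]
      rw [if_neg (by omega : ¬(idx ≤ j ∧ j < idx))]
      ring
  | cons item rest ih =>
      have hlen : idx + 1 + rest.length ≤ (s.set idx (s.getD idx 0 + item.sum)).length := by
        simp only [List.length_set]
        simp only [List.length_cons] at h
        omega
      simp only [pvInnerA]
      rw [ih _ _ hlen]
      by_cases hji : j = idx
      · subst hji
        have hidx : j < s.length := by simp only [List.length_cons] at h; omega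
        rw [if_neg (by omega : ¬(j + 1 ≤ j ∧ j < j + 1 + rest.length))]
        rw [if_pos (by simp only [List.length_cons]; omega : j ≤ j ∧ j < j + (item :: rest).length)]
        simp only [Nat.sub_self, List.getElem?_cons_zero, Option.getD_some]
        simp only [List.getD_eq_getElem?_getD, List.getElem?_set]
        simp only [if_pos hidx, if_true, Option.getD_some]
        ring
      · have hset : (s.set idx (s.getD idx 0 + item.sum)).getD j 0 = s.getD j 0 := by
          simp only [List.getD_eq_getElem?_getD, List.getElem?_set]
          rw [if_neg (fun hh => hji hh.symm)]
        rw [hset]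
        congr 1
        by_cases hc : idx + 1 ≤ j ∧ j < idx + 1 + rest.length
        · rw [if_pos hc, if_pos (by simp only [List.length_cons]; omega)]
          have : j - idx = (j - (idx + 1)) + 1 := by omega
          rw [this, List.getElem?_cons_succ]
        · rw [if_neg hc, if_neg (by simp only [List.length_cons]; omega)]

-- A's outer loop, pointwise
theorem pvOuterA_length (arrays : List (List (List Int))) (s : List Int) :
    (arrays.foldl (fun s arr => pvInnerA s 0 arr) s).length = s.length := by
  induction arrays generalizing s with
  | nil => rfl
  | cons a rest ih => simp [List.foldl_cons, ih, pvInnerA_length]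

theorem pvOuterA_getD (arrays : List (List (List Int))) (s : List Int)
    (h : ∀ arr ∈ arrays, arr.length ≤ s.length) (j : Nat) :
    (arrays.foldl (fun s arr => pvInnerA s 0 arr) s).getD j 0 =
      s.getD j 0 + pvColSum arrays j := by
  induction arrays generalizing s with
  | nil => simp [pvColSum]
  | cons a rest ih =>
      simp only [List.foldl_cons]
      rw [ih _ (fun arr hm => by rw [pvInnerA_length]; exact h arr (List.mem_cons_of_mem _ hm))]
      rw [pvInnerA_getD a s 0 (by simpa using h a List.mem_cons_self) j]
      simp only [pvColSum]
      by_cases hj : j < a.length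
      · rw [if_pos ⟨Nat.zero_le _, by omega⟩]
        simp only [Nat.sub_zero]
        ring
      · rw [if_neg (by omega : ¬(0 ≤ j ∧ j < 0 + a.length))]
        have : a[j]? = none := by
          rw [List.getElem?_eq_none_iff]
          omega
        rw [this]
        simp only [Option.getD_none, List.sum_nil]
        ring

-- the port's max_length agrees with pvMaxLen on nonempty input
theorem pvMaxA_eq (arrays : List (List (List Int))) (h : arrays ≠ []) :
    ((PySem.List.max? (arrays.map (fun a => (a.length : Int))) (fun x => x)).getD 0).toNat
      = pvMaxLen arrays := by
  have hne : arrays.map (fun a => (a.length : Int)) ≠ [] := by simpa using h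
  obtain ⟨m, hm⟩ : ∃ m, PySem.List.max? (arrays.map (fun a => (a.length : Int))) (fun x => x) = some m := by
    rcases hmx : PySem.List.max? (arrays.map (fun a => (a.length : Int))) (fun x => x) with _ | m
    · exact absurd ((PySem.List.max?_eq_none_iff _ _).mp hmx) hne
    · exact ⟨m, hmx⟩
  rw [hm]
  simp only [Option.getD_some]
  obtain ⟨arr0, harr0, hcast⟩ := List.mem_map.mp (PySem.List.max?_mem hm)
  have hle : ∀ y ∈ arrays.map (fun a => (a.length : Int)), y ≤ m := by
    intro y hy
    simpa using PySem.List.max?_isMax hm y hy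
  have h1 : m.toNat ≤ pvMaxLen arrays := by
    have := pvMaxLen_ge arrays arr0 harr0
    omega
  have h2 : pvMaxLen arrays ≤ m.toNat := by
    obtain ⟨arr1, harr1, hlen1⟩ := List.mem_map.mp (pvMaxLen_mem arrays h)
    have := hle (arr1.length : Int) (List.mem_map.mpr ⟨arr1, harr1, rfl⟩)
    omega
  omega

-- ===== VERDICT (by name: the statement is the Claim_ definition above) =====
theorem compute_sum_of_tj_spec : Claim_equal_compute_sum_of_tj := by
  intro arrays _
  unfold Spec_compute_sum_of_tj
  by_cases h : arrays = []
  · subst h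
    simp only [compute_sum_of_tj, if_true, compute_sum_of_tj_alt]
    rw [pvCols]
    simp
  · unfold compute_sum_of_tj
    rw [if_neg h]
    set M : Int := (PySem.List.max? (arrays.map (fun a => (a.length : Int))) (fun x => x)).getD 0 with hMdef
    have hMlen : (List.replicate M.toNat (0 : Int)).length = pvMaxLen arrays := by
      rw [List.length_replicate, hMdef, pvMaxA_eq arrays h]
    apply List.ext_getElem
    · rw [pvOuterA_length, hMlen, pvAlt_length]
    · intro j hj1 hj2
      have hA := pvOuterA_getD arrays (List.replicate M.toNat (0 : Int))
        (fun arr hm => by rw [hMlen]; exact pvMaxLen_ge arrays arr hm) j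
      have hj1' : j < (List.replicate M.toNat (0 : Int)).length := by
        rw [pvOuterA_length] at hj1; exact hj1
      rw [List.getD_eq_getElem _ 0 hj1] at hA
      rw [List.getD_eq_getElem _ 0 hj1', List.getElem_replicate] at hA
      have hj2' : j < pvMaxLen arrays := by rw [pvAlt_length] at hj2; exact hj2
      rw [← List.getD_eq_getElem _ 0 hj2, pvAlt_getD arrays j hj2', hA]
      ring
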